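-- pv_equiv track=rewrite | github.com/Clararigaud/AMN-python-parser | Midi.py | getGamme
-- ===== SOURCE A (Python) =====
-- def getGamme(scaleNote = "C", scaleSign = 0, customInt=None):
--     intM = [2,2,1,2,2,2,1]
--     intm = [2,1,2,2,1,3,1]
--
--     if customInt:
--         intervalles = customInt
--     elif scaleNote in ["A","B","C","D","E","F","G"]:
--         intervalles = intM
--     elif scaleNote in ["a","b","c","d","e","f","g"]:
--         intervalles = intm
--
--     scales = ["C","D","E","F","G","A","B"]
--     gamnote = scaleNote.upper()
--     base = sum(intM[0:scales.index(gamnote)])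
--     base += scaleSign
--     order = ["C","D","E","F","G","A","B"]
--     order = order[order.index(gamnote)+1:]+order[0:order.index(gamnote)]
--     gamme ={}
--     gamme[gamnote] = base
--     i=0
--     for pitch in order:
--         base += intervalles[i]
--         gamme[pitch] = base
--         i +=1
--     return gamme
-- ===== SOURCE B (Python) =====
-- def getGamme(scaleNote="C", scaleSign=0, customInt=None):
--     order = ["C", "D", "E", "F", "G", "A", "B"]
--     intM = [2, 2, 1, 2, 2, 2, 1]
--     gamnote = scaleNote.upper()
--     k = order.index(gamnote)
--     if customInt:
--         intervalles = customInt
--     elif scaleNote in order: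
--         intervalles = intM
--     else:
--         intervalles = [2, 1, 2, 2, 1, 3, 1]
--     base = sum(intM[:k]) + scaleSign
--     notes = [gamnote] + order[k + 1:] + order[:k]
--     pitches = [base + sum(intervalles[:j]) for j in range(7)]
--     return dict(zip(notes, pitches))
-- ===== Notes on version B (the rewrite author's own statement) =====
-- stated objective: idiomatic
-- what changed: B replaces A's mutating index-tracking loop over a dict with a prefix-sum pitch table (base + sum of the first j intervals) zipped against the rotated note list.
import Mathlib
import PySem

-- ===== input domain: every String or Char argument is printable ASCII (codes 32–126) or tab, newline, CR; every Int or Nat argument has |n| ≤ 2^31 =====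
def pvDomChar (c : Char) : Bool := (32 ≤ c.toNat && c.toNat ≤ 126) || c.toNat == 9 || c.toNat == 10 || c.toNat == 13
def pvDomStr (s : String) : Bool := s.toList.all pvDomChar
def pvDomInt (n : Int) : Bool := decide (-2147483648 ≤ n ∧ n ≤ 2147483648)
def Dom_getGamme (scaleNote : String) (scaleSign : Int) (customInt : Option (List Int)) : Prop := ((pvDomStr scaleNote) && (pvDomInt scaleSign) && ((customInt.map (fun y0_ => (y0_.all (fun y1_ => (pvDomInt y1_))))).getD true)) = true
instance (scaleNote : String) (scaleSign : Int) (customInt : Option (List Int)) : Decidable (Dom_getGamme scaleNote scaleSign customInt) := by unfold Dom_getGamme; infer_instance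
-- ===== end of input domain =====

-- B replaces the mutating index-tracking loop of A by a prefix-sum table zipped with the
-- rotated note list (objective: idiomatic); same return value on all inputs admitted by Pre_.

-- ===== PORT A =====
-- literal transliteration of A; the `[]` fallback for `intervalles` and the `.getD 0` after
-- `index?` stand for Python's UnboundLocalError / ValueError, which Pre_ excludes.
def getGamme (scaleNote : String) (scaleSign : Int) (customInt : Option (List Int)) : List (String × Int) :=
  let intM : List Int := [2,2,1,2,2,2,1]
  let intm : List Int := [2,1,2,2,1,3,1]
  let intervalles : List Int :=
    if (match customInt with | some l => !l.isEmpty | none => false) then customInt.getD []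
    else if scaleNote ∈ ["A","B","C","D","E","F","G"] then intM
    else if scaleNote ∈ ["a","b","c","d","e","f","g"] then intm
    else []
  let scales : List String := ["C","D","E","F","G","A","B"]
  let gamnote := PySem.Str.upper scaleNote
  let base := (PySem.List.slice intM (some 0) (some ((PySem.List.index? scales gamnote).getD 0 : Nat))).sum
  let base := base + scaleSign
  let order : List String := ["C","D","E","F","G","A","B"]
  let k : Nat := (PySem.List.index? order gamnote).getD 0
  let order := PySem.List.slice order (some ((k : Int) + 1)) none ++ PySem.List.slice order (some 0) (some (k : Int))
  let gamme : PySem.Dict String Int := PySem.Dict.empty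
  let gamme := gamme.insert gamnote base
  let st := order.foldl
    (fun (p : Int × Int × PySem.Dict String Int) pitch =>
      let base := p.1 + PySem.List.pyGetD intervalles p.2.1 0
      (base, p.2.1 + 1, p.2.2.insert pitch base))
    (base, 0, gamme)
  st.2.2.items

-- ===== PORT B =====
def getGamme_alt (scaleNote : String) (scaleSign : Int) (customInt : Option (List Int)) : List (String × Int) :=
  let order : List String := ["C","D","E","F","G","A","B"]
  let intM : List Int := [2,2,1,2,2,2,1]
  let gamnote := PySem.Str.upper scaleNote
  let k : Nat := (PySem.List.index? order gamnote).getD 0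
  let intervalles : List Int :=
    if (match customInt with | some l => !l.isEmpty | none => false) then customInt.getD []
    else if scaleNote ∈ order then intM
    else [2,1,2,2,1,3,1]
  let base := (PySem.List.slice intM none (some (k : Int))).sum + scaleSign
  let notes := [gamnote] ++ PySem.List.slice order (some ((k : Int) + 1)) none ++ PySem.List.slice order none (some (k : Int))
  let pitches := (PySem.List.pyRange 0 7 1).map (fun j => base + (PySem.List.slice intervalles none (some j)).sum)
  notes.zip pitches

-- ===== PRECONDITION & SPEC =====
-- Pre_ excludes exactly the inputs where A raises: scaleNote not a single note letter
-- (ValueError / UnboundLocalError) and a nonempty customInt shorter than 6 (IndexError).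
def Pre_getGamme (scaleNote : String) (scaleSign : Int) (customInt : Option (List Int)) : Prop :=
  scaleNote ∈ ["A","B","C","D","E","F","G","a","b","c","d","e","f","g"] ∧
  (customInt.getD [] = [] ∨ 6 ≤ (customInt.getD []).length)
instance (scaleNote : String) (scaleSign : Int) (customInt : Option (List Int)) : Decidable (Pre_getGamme scaleNote scaleSign customInt) := by unfold Pre_getGamme; infer_instance

def pvWitness_getGamme : String × Int × Option (List Int) := ("C", 0, none)

def Spec_getGamme (scaleNote : String) (scaleSign : Int) (customInt : Option (List Int)) (out : List (String × Int)) : Prop := out = getGamme_alt scaleNote scaleSign customInt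
instance (scaleNote : String) (scaleSign : Int) (customInt : Option (List Int)) (out : List (String × Int)) : Decidable (Spec_getGamme scaleNote scaleSign customInt out) := by unfold Spec_getGamme; infer_instance

-- ===== CLAIM (what is proved, stated in full; the proofs are below) =====
def Claim_equal_getGamme : Prop := ∀ (scaleNote : String) (scaleSign : Int) (customInt : Option (List Int)), Dom_getGamme scaleNote scaleSign customInt → Pre_getGamme scaleNote scaleSign customInt → Spec_getGamme scaleNote scaleSign customInt (getGamme scaleNote scaleSign customInt)

-- ===== LEMMAS AND PROOFS =====
-- an insertion into a Dict whose key is absent keeps other keys absent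
lemma contains_insert_fresh (acc : PySem.Dict String Int) (s s' : String) (v : Int)
    (hne : s' ≠ s) (h : acc.contains s' = false) (hcs : acc.contains s = false) :
    (acc.insert s v).contains s' = false := by
  have hb : (s == s') = false := beq_eq_false_iff_ne.2 (Ne.symm hne)
  simp only [PySem.Dict.contains] at h hcs ⊢
  simp only [PySem.Dict.insert, PySem.Dict.contains, hcs]
  simp [List.any_append, h, hb]

lemma pvFoldA (ord : List String) (iv : List Int) (base : Int) (k : Nat)
    (acc : PySem.Dict String Int)
    (hlen : k + ord.length ≤ iv.length)
    (hfresh : ∀ s ∈ ord, acc.contains s = false) (hnd : ord.Nodup) :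
    (ord.foldl
      (fun (p : Int × Int × PySem.Dict String Int) pitch =>
        let b := p.1 + PySem.List.pyGetD iv p.2.1 0
        (b, p.2.1 + 1, p.2.2.insert pitch b))
      (base, (k : Int), acc)).2.2.items
    = acc.items ++ ord.zip ((List.range ord.length).map
        (fun j => base + ((iv.drop k).take (j + 1)).sum)) := by
  induction ord generalizing base k acc with
  | nil => simp
  | cons s ord ih =>
    have hk : k < iv.length := by simp at hlen; omega
    have hdk : iv.drop k = iv[k] :: iv.drop (k + 1) := List.drop_eq_getElem_cons hk
    have hget : PySem.List.pyGetD iv (k : Int) 0 = iv[k] := by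
      simp [List.getD_eq_getElem?_getD, hk]
    simp only [List.foldl_cons, hget]
    have hcast : (k : Int) + 1 = ((k + 1 : Nat) : Int) := by push_cast; ring
    rw [hcast, ih (base + iv[k]) (k + 1) _ (by simp at hlen ⊢; omega)
        (fun s' hs' => contains_insert_fresh _ _ _ _
          (by rintro rfl; exact (List.nodup_cons.1 hnd).1 hs') (hfresh s' (by simp [hs']))
          (hfresh s (by simp)))
        (List.nodup_cons.1 hnd).2]
    have hins : (acc.insert s (base + iv[k])).items = acc.items ++ [(s, base + iv[k])] := by
      have : acc.contains s = false := hfresh s (by simp)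
      simp [PySem.Dict.insert, this]
    rw [hins]
    simp only [List.length_cons, List.range_succ_eq_map, List.map_cons, List.map_map,
      List.zip_cons_cons, List.append_assoc, List.singleton_append]
    congr 1
    refine List.cons_eq_cons.2 ⟨?_, ?_⟩
    · rw [hdk]
      simp only [zero_add, List.take_succ_cons, List.take_zero, List.sum_cons, List.sum_nil,
        add_zero]
    · congr 1
      refine List.map_congr_left fun j hj => ?_
      simp only [Function.comp_apply, hdk, Nat.succ_eq_add_one, List.take_succ_cons,
        List.sum_cons, add_assoc]
lemma pvFoldA0 (ord : List String) (iv : List Int) (base : Int) (acc : PySem.Dict String Int)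
    (hlen : ord.length ≤ iv.length)
    (hfresh : ∀ s ∈ ord, acc.contains s = false) (hnd : ord.Nodup) :
    (ord.foldl
      (fun (p : Int × Int × PySem.Dict String Int) pitch =>
        let b := p.1 + PySem.List.pyGetD iv p.2.1 0
        (b, p.2.1 + 1, p.2.2.insert pitch b))
      (base, (0 : Int), acc)).2.2.items
    = acc.items ++ ord.zip ((List.range ord.length).map
        (fun j => base + (iv.take (j + 1)).sum)) := by
  have h := pvFoldA ord iv base 0 acc (by omega) hfresh hnd
  simpa using h
-- closed-term evaluations (one family per root note), used to reduce both ports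
lemma pvUpC : PySem.Str.upper "C" = "C" := by decide
lemma pvUpc_ : PySem.Str.upper "c" = "C" := by decide
lemma pvBaseAC : (PySem.List.slice ([2,2,1,2,2,2,1] : List Int) (some 0) (some (↑((PySem.List.index? ["C","D","E","F","G","A","B"] "C").getD 0) : Int))).sum = 0 := by decide
lemma pvBaseBC : (PySem.List.slice ([2,2,1,2,2,2,1] : List Int) none (some (↑((PySem.List.index? ["C","D","E","F","G","A","B"] "C").getD 0) : Int))).sum = 0 := by decide
lemma pvFromC : PySem.List.slice ["C","D","E","F","G","A","B"] (some ((↑((PySem.List.index? ["C","D","E","F","G","A","B"] "C").getD 0) : Int) + 1)) none = ["D","E","F","G","A","B"] := by decide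
lemma pvToAC : PySem.List.slice ["C","D","E","F","G","A","B"] (some 0) (some (↑((PySem.List.index? ["C","D","E","F","G","A","B"] "C").getD 0) : Int)) = [] := by decide
lemma pvToBC : PySem.List.slice ["C","D","E","F","G","A","B"] none (some (↑((PySem.List.index? ["C","D","E","F","G","A","B"] "C").getD 0) : Int)) = [] := by decide
lemma pvUpD : PySem.Str.upper "D" = "D" := by decide
lemma pvUpd_ : PySem.Str.upper "d" = "D" := by decide
lemma pvBaseAD : (PySem.List.slice ([2,2,1,2,2,2,1] : List Int) (some 0) (some (↑((PySem.List.index? ["C","D","E","F","G","A","B"] "D").getD 0) : Int))).sum = 2 := by decide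
lemma pvBaseBD : (PySem.List.slice ([2,2,1,2,2,2,1] : List Int) none (some (↑((PySem.List.index? ["C","D","E","F","G","A","B"] "D").getD 0) : Int))).sum = 2 := by decide
lemma pvFromD : PySem.List.slice ["C","D","E","F","G","A","B"] (some ((↑((PySem.List.index? ["C","D","E","F","G","A","B"] "D").getD 0) : Int) + 1)) none = ["E","F","G","A","B"] := by decide
lemma pvToAD : PySem.List.slice ["C","D","E","F","G","A","B"] (some 0) (some (↑((PySem.List.index? ["C","D","E","F","G","A","B"] "D").getD 0) : Int)) = ["C"] := by decide
lemma pvToBD : PySem.List.slice ["C","D","E","F","G","A","B"] none (some (↑((PySem.List.index? ["C","D","E","F","G","A","B"] "D").getD 0) : Int)) = ["C"] := by decide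
lemma pvUpE : PySem.Str.upper "E" = "E" := by decide
lemma pvUpe_ : PySem.Str.upper "e" = "E" := by decide
lemma pvBaseAE : (PySem.List.slice ([2,2,1,2,2,2,1] : List Int) (some 0) (some (↑((PySem.List.index? ["C","D","E","F","G","A","B"] "E").getD 0) : Int))).sum = 4 := by decide
lemma pvBaseBE : (PySem.List.slice ([2,2,1,2,2,2,1] : List Int) none (some (↑((PySem.List.index? ["C","D","E","F","G","A","B"] "E").getD 0) : Int))).sum = 4 := by decide
lemma pvFromE : PySem.List.slice ["C","D","E","F","G","A","B"] (some ((↑((PySem.List.index? ["C","D","E","F","G","A","B"] "E").getD 0) : Int) + 1)) none = ["F","G","A","B"] := by decide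
lemma pvToAE : PySem.List.slice ["C","D","E","F","G","A","B"] (some 0) (some (↑((PySem.List.index? ["C","D","E","F","G","A","B"] "E").getD 0) : Int)) = ["C","D"] := by decide
lemma pvToBE : PySem.List.slice ["C","D","E","F","G","A","B"] none (some (↑((PySem.List.index? ["C","D","E","F","G","A","B"] "E").getD 0) : Int)) = ["C","D"] := by decide
lemma pvUpF : PySem.Str.upper "F" = "F" := by decide
lemma pvUpf_ : PySem.Str.upper "f" = "F" := by decide
lemma pvBaseAF : (PySem.List.slice ([2,2,1,2,2,2,1] : List Int) (some 0) (some (↑((PySem.List.index? ["C","D","E","F","G","A","B"] "F").getD 0) : Int))).sum = 5 := by decide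
lemma pvBaseBF : (PySem.List.slice ([2,2,1,2,2,2,1] : List Int) none (some (↑((PySem.List.index? ["C","D","E","F","G","A","B"] "F").getD 0) : Int))).sum = 5 := by decide
lemma pvFromF : PySem.List.slice ["C","D","E","F","G","A","B"] (some ((↑((PySem.List.index? ["C","D","E","F","G","A","B"] "F").getD 0) : Int) + 1)) none = ["G","A","B"] := by decide
lemma pvToAF : PySem.List.slice ["C","D","E","F","G","A","B"] (some 0) (some (↑((PySem.List.index? ["C","D","E","F","G","A","B"] "F").getD 0) : Int)) = ["C","D","E"] := by decide
lemma pvToBF : PySem.List.slice ["C","D","E","F","G","A","B"] none (some (↑((PySem.List.index? ["C","D","E","F","G","A","B"] "F").getD 0) : Int)) = ["C","D","E"] := by decide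
lemma pvUpG : PySem.Str.upper "G" = "G" := by decide
lemma pvUpg_ : PySem.Str.upper "g" = "G" := by decide
lemma pvBaseAG : (PySem.List.slice ([2,2,1,2,2,2,1] : List Int) (some 0) (some (↑((PySem.List.index? ["C","D","E","F","G","A","B"] "G").getD 0) : Int))).sum = 7 := by decide
lemma pvBaseBG : (PySem.List.slice ([2,2,1,2,2,2,1] : List Int) none (some (↑((PySem.List.index? ["C","D","E","F","G","A","B"] "G").getD 0) : Int))).sum = 7 := by decide
lemma pvFromG : PySem.List.slice ["C","D","E","F","G","A","B"] (some ((↑((PySem.List.index? ["C","D","E","F","G","A","B"] "G").getD 0) : Int) + 1)) none = ["A","B"] := by decide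
lemma pvToAG : PySem.List.slice ["C","D","E","F","G","A","B"] (some 0) (some (↑((PySem.List.index? ["C","D","E","F","G","A","B"] "G").getD 0) : Int)) = ["C","D","E","F"] := by decide
lemma pvToBG : PySem.List.slice ["C","D","E","F","G","A","B"] none (some (↑((PySem.List.index? ["C","D","E","F","G","A","B"] "G").getD 0) : Int)) = ["C","D","E","F"] := by decide
lemma pvUpA : PySem.Str.upper "A" = "A" := by decide
lemma pvUpa_ : PySem.Str.upper "a" = "A" := by decide
lemma pvBaseAA : (PySem.List.slice ([2,2,1,2,2,2,1] : List Int) (some 0) (some (↑((PySem.List.index? ["C","D","E","F","G","A","B"] "A").getD 0) : Int))).sum = 9 := by decide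
lemma pvBaseBA : (PySem.List.slice ([2,2,1,2,2,2,1] : List Int) none (some (↑((PySem.List.index? ["C","D","E","F","G","A","B"] "A").getD 0) : Int))).sum = 9 := by decide
lemma pvFromA : PySem.List.slice ["C","D","E","F","G","A","B"] (some ((↑((PySem.List.index? ["C","D","E","F","G","A","B"] "A").getD 0) : Int) + 1)) none = ["B"] := by decide
lemma pvToAA : PySem.List.slice ["C","D","E","F","G","A","B"] (some 0) (some (↑((PySem.List.index? ["C","D","E","F","G","A","B"] "A").getD 0) : Int)) = ["C","D","E","F","G"] := by decide
lemma pvToBA : PySem.List.slice ["C","D","E","F","G","A","B"] none (some (↑((PySem.List.index? ["C","D","E","F","G","A","B"] "A").getD 0) : Int)) = ["C","D","E","F","G"] := by decide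
lemma pvUpB : PySem.Str.upper "B" = "B" := by decide
lemma pvUpb_ : PySem.Str.upper "b" = "B" := by decide
lemma pvBaseAB : (PySem.List.slice ([2,2,1,2,2,2,1] : List Int) (some 0) (some (↑((PySem.List.index? ["C","D","E","F","G","A","B"] "B").getD 0) : Int))).sum = 11 := by decide
lemma pvBaseBB : (PySem.List.slice ([2,2,1,2,2,2,1] : List Int) none (some (↑((PySem.List.index? ["C","D","E","F","G","A","B"] "B").getD 0) : Int))).sum = 11 := by decide
lemma pvFromB : PySem.List.slice ["C","D","E","F","G","A","B"] (some ((↑((PySem.List.index? ["C","D","E","F","G","A","B"] "B").getD 0) : Int) + 1)) none = [] := by decide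
lemma pvToAB : PySem.List.slice ["C","D","E","F","G","A","B"] (some 0) (some (↑((PySem.List.index? ["C","D","E","F","G","A","B"] "B").getD 0) : Int)) = ["C","D","E","F","G","A"] := by decide
lemma pvToBB : PySem.List.slice ["C","D","E","F","G","A","B"] none (some (↑((PySem.List.index? ["C","D","E","F","G","A","B"] "B").getD 0) : Int)) = ["C","D","E","F","G","A"] := by decide
lemma pvMemUuC : ("C" ∈ (["A","B","C","D","E","F","G"] : List String)) = True := by simp
lemma pvMemUlc : ("c" ∈ (["A","B","C","D","E","F","G"] : List String)) = False := by simp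
lemma pvMemLlc : ("c" ∈ (["a","b","c","d","e","f","g"] : List String)) = True := by simp
lemma pvMemUuD : ("D" ∈ (["A","B","C","D","E","F","G"] : List String)) = True := by simp
lemma pvMemUld : ("d" ∈ (["A","B","C","D","E","F","G"] : List String)) = False := by simp
lemma pvMemLld : ("d" ∈ (["a","b","c","d","e","f","g"] : List String)) = True := by simp
lemma pvMemUuE : ("E" ∈ (["A","B","C","D","E","F","G"] : List String)) = True := by simp
lemma pvMemUle : ("e" ∈ (["A","B","C","D","E","F","G"] : List String)) = False := by simp
lemma pvMemLle : ("e" ∈ (["a","b","c","d","e","f","g"] : List String)) = True := by simp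
lemma pvMemUuF : ("F" ∈ (["A","B","C","D","E","F","G"] : List String)) = True := by simp
lemma pvMemUlf : ("f" ∈ (["A","B","C","D","E","F","G"] : List String)) = False := by simp
lemma pvMemLlf : ("f" ∈ (["a","b","c","d","e","f","g"] : List String)) = True := by simp
lemma pvMemUuG : ("G" ∈ (["A","B","C","D","E","F","G"] : List String)) = True := by simp
lemma pvMemUlg : ("g" ∈ (["A","B","C","D","E","F","G"] : List String)) = False := by simp
lemma pvMemLlg : ("g" ∈ (["a","b","c","d","e","f","g"] : List String)) = True := by simp
lemma pvMemUuA : ("A" ∈ (["A","B","C","D","E","F","G"] : List String)) = True := by simp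
lemma pvMemUla : ("a" ∈ (["A","B","C","D","E","F","G"] : List String)) = False := by simp
lemma pvMemLla : ("a" ∈ (["a","b","c","d","e","f","g"] : List String)) = True := by simp
lemma pvMemUuB : ("B" ∈ (["A","B","C","D","E","F","G"] : List String)) = True := by simp
lemma pvMemUlb : ("b" ∈ (["A","B","C","D","E","F","G"] : List String)) = False := by simp
lemma pvMemLlb : ("b" ∈ (["a","b","c","d","e","f","g"] : List String)) = True := by simp
lemma pvRng7 : PySem.List.pyRange 0 7 1 = [0,1,2,3,4,5,6] := by decide

lemma pvSix : ∀ (l : List Int), 6 ≤ l.length → ∃ a b c d e f t, l = a::b::c::d::e::f::t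
  | a::b::c::d::e::f::t, _ => ⟨a,b,c,d,e,f,t,rfl⟩
  | [], h | [_], h | [_,_], h | [_,_,_], h | [_,_,_,_], h | [_,_,_,_,_], h => by simp at h

-- ===== VERDICT =====
set_option maxHeartbeats 1000000 in
theorem getGamme_spec : Claim_equal_getGamme := by
  intro sn ss ci _ hpre
  unfold Spec_getGamme
  obtain ⟨hm, hlen⟩ := hpre
  rcases ci with _ | l
  · fin_cases hm <;>
    (simp only [getGamme, getGamme_alt, pvUpC, pvUpc_, pvBaseAC, pvBaseBC, pvFromC, pvToAC, pvToBC, pvUpD, pvUpd_, pvBaseAD, pvBaseBD, pvFromD, pvToAD, pvToBD, pvUpE, pvUpe_, pvBaseAE, pvBaseBE, pvFromE, pvToAE, pvToBE, pvUpF, pvUpf_, pvBaseAF, pvBaseBF, pvFromF, pvToAF, pvToBF, pvUpG, pvUpg_, pvBaseAG, pvBaseBG, pvFromG, pvToAG, pvToBG, pvUpA, pvUpa_, pvBaseAA, pvBaseBA, pvFromA, pvToAA, pvToBA, pvUpB, pvUpb_, pvBaseAB, pvBaseBB, pvFromB, pvToAB, pvToBB, pvMemUuC, pvMemUlc, pvMemLlc,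 pvMemUuD, pvMemUld, pvMemLld, pvMemUuE, pvMemUle, pvMemLle, pvMemUuF, pvMemUlf, pvMemLlf, pvMemUuG, pvMemUlg, pvMemLlg, pvMemUuA, pvMemUla, pvMemLla, pvMemUuB, pvMemUlb, pvMemLlb, pvRng7,
        List.isEmpty_cons, List.isEmpty_nil, Bool.not_false, Bool.not_true, ite_true, ite_false,
        Bool.false_eq_true, Option.getD_some, List.sum_nil, zero_add]
     rw [pvFoldA0 _ _ _ _ (by simp) (by exact fun s hs => by fin_cases hs <;> rfl) (by decide)]
     simp [PySem.Dict.insert, PySem.Dict.empty, PySem.Dict.contains, List.range_succ,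
        PySem.List.slice_to, List.take_succ_cons, add_assoc])
  · simp only [Option.getD_some] at hlen
    rcases hlen with rfl | h6
    · fin_cases hm <;>
      (simp only [getGamme, getGamme_alt, pvUpC, pvUpc_, pvBaseAC, pvBaseBC, pvFromC, pvToAC, pvToBC, pvUpD, pvUpd_, pvBaseAD, pvBaseBD, pvFromD, pvToAD, pvToBD, pvUpE, pvUpe_, pvBaseAE, pvBaseBE, pvFromE, pvToAE, pvToBE, pvUpF, pvUpf_, pvBaseAF, pvBaseBF, pvFromF, pvToAF, pvToBF, pvUpG, pvUpg_, pvBaseAG, pvBaseBG, pvFromG, pvToAG, pvToBG, pvUpA, pvUpa_, pvBaseAA, pvBaseBA, pvFromA, pvToAA, pvToBA, pvUpB, pvUpb_, pvBaseAB, pvBaseBB, pvFromB, pvToAB, pvToBB, pvMemUuC, pvMemUlc, pvMemLlc, pvMemUuD, pvMemUld, pvMemLld, pvMemUuE, pvMemUle, pvMemLle, pvMemUuF, pvMemUlf, pvMemLlf, pvMemUuG, pvMemUlg, pvMemLlg, pvMemUuA, pvMemUla, pvMemLla, pvMemUuB, pvMemUlb, pvMemLlb, pvRng7,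
          List.isEmpty_cons, List.isEmpty_nil, Bool.not_false, Bool.not_true, ite_true, ite_false,
          Bool.false_eq_true, Option.getD_some, List.sum_nil, zero_add]
       rw [pvFoldA0 _ _ _ _ (by simp) (by exact fun s hs => by fin_cases hs <;> rfl) (by decide)]
       simp [PySem.Dict.insert, PySem.Dict.empty, PySem.Dict.contains, List.range_succ,
          PySem.List.slice_to, List.take_succ_cons, add_assoc])
    · obtain ⟨a,b,c,d,e,f,t,rfl⟩ := pvSix l h6
      fin_cases hm <;>
      (simp only [getGamme, getGamme_alt, pvUpC, pvUpc_, pvBaseAC, pvBaseBC, pvFromC, pvToAC, pvToBC, pvUpD, pvUpd_, pvBaseAD, pvBaseBD, pvFromD, pvToAD, pvToBD, pvUpE, pvUpe_, pvBaseAE, pvBaseBE, pvFromE, pvToAE, pvToBE, pvUpF, pvUpf_, pvBaseAF, pvBaseBF, pvFromF, pvToAF, pvToBF, pvUpG, pvUpg_, pvBaseAG, pvBaseBG, pvFromG, pvToAG, pvToBG, pvUpA, pvUpa_, pvBaseAA, pvBaseBA, pvFromA, pvToAA, pvToBA, pvUpB, pvUpb_, pvBaseAB, pvBaseBB, pvFromB,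 pvToAB, pvToBB, pvMemUuC, pvMemUlc, pvMemLlc, pvMemUuD, pvMemUld, pvMemLld, pvMemUuE, pvMemUle, pvMemLle, pvMemUuF, pvMemUlf, pvMemLlf, pvMemUuG, pvMemUlg, pvMemLlg, pvMemUuA, pvMemUla, pvMemLla, pvMemUuB, pvMemUlb, pvMemLlb, pvRng7,
          List.isEmpty_cons, List.isEmpty_nil, Bool.not_false, Bool.not_true, ite_true, ite_false,
          Bool.false_eq_true, Option.getD_some, List.sum_nil, zero_add]
       rw [pvFoldA0 _ _ _ _ (by simp) (by exact fun s hs => by fin_cases hs <;> rfl) (by decide)]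
       simp [PySem.Dict.insert, PySem.Dict.empty, PySem.Dict.contains, List.range_succ,
          PySem.List.slice_to, List.take_succ_cons, add_assoc])
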